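-- pv_equiv track=rewrite | github.com/SeanHRN/krita-renpy-scripter | krita_renpy_scripter/krita_renpy_scripter.py | removeTagsFromPaths
-- ===== SOURCE A (Python) =====
-- def removeTagsFromPaths(path_list):
--     """
--     Remove the meta tags from the paths.
--     The cleaned path gets the last slash cut off because that would
--     be between the file name and the extension (which is attached during the print step).
--     """
--     cleaned_path_list = []
--     for path in path_list:
--         layers = path.split("/")
--         cleaned_path = ""
--         for layer in layers:
--             cleaned_path = cleaned_path + layer.split(' ')[0] + "/"
--         cleaned_path = cleaned_path[:-1]
--         cleaned_path_list.append(cleaned_path)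
--     return cleaned_path_list
-- ===== SOURCE B (Python) =====
-- def removeTagsFromPaths(path_list):
--     """
--     Remove the meta tags from the paths, keeping only the part of each
--     slash-segment before its first space. Single pass per path with a
--     skip flag instead of split/rebuild/trim.
--     """
--     cleaned_path_list = []
--     for path in path_list:
--         out = []
--         skip = False
--         for ch in path:
--             if ch == '/':
--                 skip = False
--                 out.append(ch)
--             elif ch == ' ':
--                 skip = True
--             elif not skip:
--                 out.append(ch)
--         cleaned_path_list.append(''.join(out))
--     return cleaned_path_list
-- ===== Notes on version B (the rewrite author's own statement) =====
-- stated objective: alternative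
-- what changed: Replaced the nested split('/')/split(' ')/rebuild-and-trim with a single character pass per path driven by a skip flag (skip from a space to the next slash), so no segment lists and no trailing-slash trimming are built at all.
import Mathlib
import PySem

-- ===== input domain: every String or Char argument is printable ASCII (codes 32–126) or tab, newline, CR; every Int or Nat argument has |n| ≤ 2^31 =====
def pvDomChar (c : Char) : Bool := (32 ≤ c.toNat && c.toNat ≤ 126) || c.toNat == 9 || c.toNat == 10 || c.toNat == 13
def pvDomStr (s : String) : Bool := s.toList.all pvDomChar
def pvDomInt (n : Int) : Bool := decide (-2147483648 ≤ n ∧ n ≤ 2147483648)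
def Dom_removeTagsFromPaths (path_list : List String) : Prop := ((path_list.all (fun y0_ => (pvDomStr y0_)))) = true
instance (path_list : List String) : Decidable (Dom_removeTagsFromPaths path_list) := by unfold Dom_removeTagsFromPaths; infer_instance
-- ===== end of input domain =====

-- B replaces A's split('/')/split(' ')/rebuild-and-trim per path with a single character
-- pass using a skip flag; same output, no speed claim.

-- ===== PORT A =====
def removeTagsFromPaths (path_list : List String) : List String :=
  path_list.foldl (fun cleaned_path_list path =>
    let layers := PySem.Chars.splitOn path.toList ['/']
    let cleaned_path :=
      layers.foldl (fun cleaned_path layer =>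
        -- layer.split(' ')[0]: split always returns a nonempty list, so index 0 never raises; headD [] is exact here
        cleaned_path ++ (PySem.Chars.splitOn layer [' ']).headD [] ++ ['/']) ([] : List Char)
    cleaned_path_list ++ [String.ofList (PySem.List.slice cleaned_path none (some (-1)))]) []

-- ===== PORT B =====
-- one step of B's inner character loop: state = (skip flag, output so far)
def rtfpStep (st : Bool × List Char) (ch : Char) : Bool × List Char :=
  if ch = '/' then (false, st.2 ++ ['/'])
  else if ch = ' ' then (true, st.2)
  else if st.1 then st
  else (st.1, st.2 ++ [ch])

def removeTagsFromPaths_alt (path_list : List String) : List String :=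
  path_list.map (fun path => String.ofList (path.toList.foldl rtfpStep (false, [])).2)

-- ===== PRECONDITION & SPEC =====
def Spec_removeTagsFromPaths (path_list : List String) (out : List String) : Prop := out = removeTagsFromPaths_alt path_list
instance (path_list : List String) (out : List String) : Decidable (Spec_removeTagsFromPaths path_list out) := by unfold Spec_removeTagsFromPaths; infer_instance

-- ===== CLAIM (what is proved, stated in full; the proofs are below) =====
def Claim_equal_removeTagsFromPaths : Prop := ∀ (path_list : List String), Dom_removeTagsFromPaths path_list → Spec_removeTagsFromPaths path_list (removeTagsFromPaths path_list)

-- ===== LEMMAS AND PROOFS =====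

/-- Structural characterisation of Python `s.split(sep)` for a one-character separator. -/
def pvMySplit (cs : List Char) (sep : Char) : List (List Char) :=
  match cs with
  | [] => [[]]
  | c :: rest =>
    if c = sep then [] :: pvMySplit rest sep
    else (pvMySplit rest sep).modifyHead (c :: ·)

lemma pvMySplit_ne_nil (cs : List Char) (sep : Char) : pvMySplit cs sep ≠ [] := by
  cases cs with
  | nil => simp [pvMySplit]
  | cons c rest =>
    simp only [pvMySplit]
    split
    · simp
    · cases h : pvMySplit rest sep with
      | nil => exact absurd h (pvMySplit_ne_nil rest sep)
      | cons a t => simp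

lemma pvGo_eq (sep : Char) :
    ∀ (fuel : Nat) (l cur : List Char) (acc : List (List Char)), l.length ≤ fuel →
      PySem.Chars.splitOn.go [sep] fuel l cur acc
        = acc.reverse ++ (pvMySplit l sep).modifyHead (cur.reverse ++ ·) := by
  intro fuel
  induction fuel with
  | zero =>
    intro l cur acc h
    have hl : l = [] := List.eq_nil_of_length_eq_zero (Nat.le_zero.mp h)
    subst hl
    rw [PySem.Chars.splitOn.go]
    simp [pvMySplit]
  | succ n ih =>
    intro l cur acc h
    cases l with
    | nil =>
      rw [PySem.Chars.splitOn.go]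
      simp [pvMySplit]
      omega
    | cons c rest =>
      rw [PySem.Chars.splitOn.go]
      by_cases hc : c = sep
      · subst hc
        have hpre : [c].isPrefixOf (c :: rest) = true := by simp [List.isPrefixOf]
        simp only [hpre, if_true, List.length_cons, List.drop_succ_cons, List.length_nil,
          List.drop_zero]
        rw [ih rest [] (cur.reverse :: acc) (by simpa using Nat.le_of_succ_le_succ h)]
        cases hms : pvMySplit rest c with
        | nil => exact absurd hms (pvMySplit_ne_nil rest c)
        | cons a t => simp [pvMySplit, hms]
      · have hpre : [sep].isPrefixOf (c :: rest) = false := by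
          simp [List.isPrefixOf]
          exact fun hh => absurd hh.symm hc
        simp only [hpre, if_false, Bool.false_eq_true]
        rw [ih rest (c :: cur) acc (by simpa using Nat.le_of_succ_le_succ h)]
        cases hms : pvMySplit rest sep with
        | nil => exact absurd hms (pvMySplit_ne_nil rest sep)
        | cons a t => simp [pvMySplit, hc, hms]

lemma pvSplitOn_eq (cs : List Char) (sep : Char) :
    PySem.Chars.splitOn cs [sep] = pvMySplit cs sep := by
  rw [PySem.Chars.splitOn, pvGo_eq sep (cs.length + 1) cs [] [] (by omega)]
  cases hms : pvMySplit cs sep with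
  | nil => exact absurd hms (pvMySplit_ne_nil cs sep)
  | cons a t => simp

/-- First token before a space: what `layer.split(' ')[0]` computes. -/
def pvTok (l : List Char) : List Char := (pvMySplit l ' ').headD []

lemma pvTok_nil : pvTok [] = [] := by simp [pvTok, pvMySplit]

lemma pvTok_cons (c : Char) (l : List Char) :
    pvTok (c :: l) = if c = ' ' then [] else c :: pvTok l := by
  simp only [pvTok, pvMySplit]
  split
  · simp
  · cases hms : pvMySplit l ' ' with
    | nil => exact absurd hms (pvMySplit_ne_nil l ' ')
    | cons a t => simp

/-- The common recursive description of the cleaned characters (B's state machine). -/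
def pvClean (skip : Bool) (cs : List Char) : List Char :=
  match cs with
  | [] => []
  | c :: rest =>
    if c = '/' then '/' :: pvClean false rest
    else if c = ' ' then pvClean true rest
    else if skip then pvClean skip rest
    else c :: pvClean skip rest

lemma pvFoldB (cs : List Char) : ∀ (skip : Bool) (acc : List Char),
    (cs.foldl rtfpStep (skip, acc)).2 = acc ++ pvClean skip cs := by
  induction cs with
  | nil => intro skip acc; simp [pvClean]
  | cons c rest ih =>
    intro skip acc
    by_cases h1 : c = '/'
    · simp [rtfpStep, h1, pvClean, ih, List.append_assoc]
    · by_cases h2 : c = ' '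
      · simp [rtfpStep, h2, pvClean, ih]
      · cases skip with
        | true => simp [rtfpStep, h1, h2, pvClean, ih]
        | false => simp [rtfpStep, h1, h2, pvClean, ih, List.append_assoc]

/-- A's inner loop builds the concatenation of `tok ++ "/"` over the slash-segments. -/
lemma pvFoldA (layers : List (List Char)) : ∀ (acc : List Char),
    (layers.foldl (fun cp layer =>
        cp ++ (PySem.Chars.splitOn layer [' ']).headD [] ++ ['/']) acc)
      = acc ++ (layers.map (fun l => pvTok l ++ ['/'])).flatten := by
  induction layers with
  | nil => intro acc; simp
  | cons l rest ih =>
    intro acc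
    simp [pvSplitOn_eq, pvTok, List.append_assoc]

/-- The two mutual invariants tying A's segment picture to B's state machine. -/
lemma pvPQ (cs : List Char) :
    ((pvMySplit cs '/').map (fun l => pvTok l ++ ['/'])).flatten = pvClean false cs ++ ['/']
    ∧ '/' :: (((pvMySplit cs '/').tail).map (fun l => pvTok l ++ ['/'])).flatten
        = pvClean true cs ++ ['/'] := by
  induction cs with
  | nil => simp [pvMySplit, pvTok_nil, pvClean]
  | cons c rest ih =>
    obtain ⟨P, Q⟩ := ih
    by_cases h1 : c = '/'
    · subst h1
      constructor
      · simp only [pvMySplit, if_pos, List.map_cons, List.flatten_cons, pvTok_nil,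
          List.nil_append, P, pvClean]
        simp
      · simp only [pvMySplit, if_pos, List.tail_cons, P, pvClean]
        simp
    · cases hms : pvMySplit rest '/' with
      | nil => exact absurd hms (pvMySplit_ne_nil rest '/')
      | cons a t =>
        rw [hms] at P Q
        simp only [List.tail_cons] at Q
        have hsplit : pvMySplit (c :: rest) '/' = (c :: a) :: t := by
          simp [pvMySplit, h1, hms]
        by_cases h2 : c = ' '
        · subst h2
          constructor
          · simp only [hsplit, List.map_cons, List.flatten_cons, pvTok_cons, if_pos,
              List.nil_append, List.singleton_append]
            simpa [pvClean, h1] using Q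
          · simp only [hsplit, List.tail_cons]
            simpa [pvClean, h1] using Q
        · constructor
          · simp only [hsplit, List.map_cons, List.flatten_cons, pvTok_cons, h2]
            simp only [List.map_cons, List.flatten_cons] at P
            simp only [pvClean, h1, h2]
            simp only [List.append_assoc] at P
            simpa using P
          · simp only [hsplit, List.tail_cons]
            simpa [pvClean, h1, h2] using Q

lemma pvOne (path : String) :
    String.ofList (PySem.List.slice
        ((PySem.Chars.splitOn path.toList ['/']).foldl (fun cp layer =>
          cp ++ (PySem.Chars.splitOn layer [' ']).headD [] ++ ['/']) ([] : List Char))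
        none (some (-1)))
      = String.ofList (path.toList.foldl rtfpStep (false, [])).2 := by
  rw [pvFoldA, pvSplitOn_eq, PySem.List.slice_to_neg_one, pvFoldB]
  simp [(pvPQ path.toList).1]

-- ===== VERDICT (by name: the statement is the Claim_ definition above) =====
theorem removeTagsFromPaths_spec : Claim_equal_removeTagsFromPaths := by
  intro path_list _
  unfold Spec_removeTagsFromPaths removeTagsFromPaths removeTagsFromPaths_alt
  rw [PySem.List.foldl_append_singleton_eq_map]
  exact List.map_congr_left (fun path _ => pvOne path)
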